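-- pv_equiv track=rewrite | github.com/svend4/meta | projects/hexgf/hexgf.py | cyclotomic_coset_of_exp
-- ===== SOURCE A (Python) =====
-- ORDER = 63         # |GF(2^6)*| = 2^6 − 1
--
-- def cyclotomic_coset_of_exp(k):
--     """
--     Циклотомический класс показателя k: {k, 2k, 4k, ...} mod 63.
--     Для k=0: {0} (соответствует элементу 1 = g^0).
--     """
--     if k == 0:
--         return frozenset([0])
--     coset = set()
--     i = k % ORDER
--     while i not in coset:
--         coset.add(i)
--         i = (2 * i) % ORDER
--     return frozenset(coset)
-- ===== SOURCE B (Python) =====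
-- ORDER = 63         # |GF(2^6)*| = 2^6 - 1
--
-- def cyclotomic_coset_of_exp(k):
--     # 2^6 = 64 == 1 (mod 63), so the orbit of k under doubling is covered by
--     # the six fixed powers; the set folds duplicates when the period divides 6,
--     # and the j=0 term makes k == 0 give {0} with no special case.
--     return frozenset((k * (1 << j)) % ORDER for j in range(6))
-- ===== Notes on version B (the rewrite author's own statement) =====
-- stated objective: simpler
-- what changed: Replaces the while-loop cycle detection (membership test until the orbit repeats) and the k==0 special case with a fixed closed-form comprehension over six powers of two, justified by 2^6 = 1 mod 63.
import Mathlib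
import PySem

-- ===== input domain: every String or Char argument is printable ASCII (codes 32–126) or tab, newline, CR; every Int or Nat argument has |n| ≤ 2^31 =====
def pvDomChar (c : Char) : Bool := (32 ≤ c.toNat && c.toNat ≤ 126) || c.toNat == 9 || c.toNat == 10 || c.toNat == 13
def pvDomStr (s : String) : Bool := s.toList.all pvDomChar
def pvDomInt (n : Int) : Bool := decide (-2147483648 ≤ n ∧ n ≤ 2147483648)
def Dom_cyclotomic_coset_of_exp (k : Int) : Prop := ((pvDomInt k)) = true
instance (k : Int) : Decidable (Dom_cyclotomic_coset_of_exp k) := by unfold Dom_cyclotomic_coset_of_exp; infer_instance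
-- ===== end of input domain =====

-- B drops A's while-loop cycle detection and k==0 guard for a fixed six-term
-- comprehension (2^6 = 1 mod 63); equivalence of the return value is proved.
-- ===== PORT A =====
-- the while-loop of A: stop when i is already in the coset; fuel 64 > any coset size,
-- so the guard is never the reason the loop stops on the 63 possible residues
def ccLoop : Nat → PySem.Set Int → Int → PySem.Set Int
  | 0, coset, _ => coset
  | fuel+1, coset, i =>
    if PySem.Set.contains coset i then coset
    else ccLoop fuel (PySem.Set.add coset i) (PySem.Int.mod (2*i) 63)

def cyclotomic_coset_of_exp (k : Int) : List Int :=
  if k = 0 then [0]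
  else ccLoop 64 PySem.Set.empty (PySem.Int.mod k 63)

-- ===== PORT B =====
-- 1 << j for j from range(6) is 2^j, j ≥ 0; ported as 2 ^ j.toNat (exact there)
def cyclotomic_coset_of_exp_alt (k : Int) : List Int :=
  PySem.Set.ofList ((PySem.List.pyRange 0 6 1).map (fun j => PySem.Int.mod (k * 2 ^ j.toNat) 63))

-- ===== PRECONDITION & SPEC =====
def Spec_cyclotomic_coset_of_exp (k : Int) (out : List Int) : Prop := out = cyclotomic_coset_of_exp_alt k
instance (k : Int) (out : List Int) : Decidable (Spec_cyclotomic_coset_of_exp k out) := by unfold Spec_cyclotomic_coset_of_exp; infer_instance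

-- ===== CLAIM (what is proved, stated in full; the proofs are below) =====
def Claim_equal_cyclotomic_coset_of_exp : Prop := ∀ (k : Int), Dom_cyclotomic_coset_of_exp k → Spec_cyclotomic_coset_of_exp k (cyclotomic_coset_of_exp k)

-- ===== LEMMAS AND PROOFS =====

-- ===== VERDICT (by name: the statement is the Claim_ definition above) =====
-- both ports depend only on k mod 63
lemma alt_emod (k : Int) :
    cyclotomic_coset_of_exp_alt k = cyclotomic_coset_of_exp_alt (k.emod 63) := by
  unfold cyclotomic_coset_of_exp_alt
  congr 1
  refine List.map_congr_left (fun j _ => ?_)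
  rw [PySem.Int.mod_eq_emod_of_pos (by norm_num),
      PySem.Int.mod_eq_emod_of_pos (by norm_num)]
  conv_lhs => rw [Int.mul_emod]
  conv_rhs => rw [Int.mul_emod]
  have h : k % 63 = k.emod 63 % 63 := (Int.emod_emod_of_dvd k dvd_rfl).symm
  rw [h]

-- the two ports agree on every residue 0 ≤ r < 63 (A via its loop form)
lemma agree_residue : ∀ n : Nat, n < 63 →
    ccLoop 64 PySem.Set.empty (n : Int) = cyclotomic_coset_of_exp_alt (n : Int) := by
  decide

theorem cyclotomic_coset_of_exp_spec : Claim_equal_cyclotomic_coset_of_exp := by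
  intro k _
  unfold Spec_cyclotomic_coset_of_exp
  by_cases hk : k = 0
  · subst hk; decide
  · unfold cyclotomic_coset_of_exp
    rw [if_neg hk, PySem.Int.mod_eq_emod_of_pos (by norm_num), alt_emod]
    have h0 : (0:Int) ≤ k.emod 63 := Int.emod_nonneg _ (by norm_num)
    have h1 : k.emod 63 < 63 := Int.emod_lt_of_pos _ (by norm_num)
    have h := agree_residue (k.emod 63).toNat (by omega)
    rwa [Int.toNat_of_nonneg h0] at h
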